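-- pv_equiv track=rewrite | github.com/EmirAlpAksungur/RadixSort | main.py | basamakBul
-- ===== SOURCE A (Python) =====
-- def basamakBul(array):
--     sayac = 0
--     newsayac = 0
--     for j in array:
--         for k in str(j):
--             sayac += 1
--             if k == ".":
--                 sayac = 0
--         if sayac > newsayac:
--             newsayac = sayac
--         sayac = 0
--     donusdegeri = 1
--     for k in range(newsayac):
--         donusdegeri = donusdegeri * 10
--     return donusdegeri
-- ===== SOURCE B (Python) =====
-- def basamakBul(array):
--     return 10 ** max((len(str(j)) for j in array), default=0)
-- ===== Notes on version B (the rewrite author's own statement) =====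
-- stated objective: simpler
-- what changed: Replaces the char-by-char reset-at-dot counter (vacuous for ints, whose str never contains '.') and the repeated-multiplication result loop with a one-line 10 ** max(len(str(j)) for j in array, default=0).
import Mathlib
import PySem

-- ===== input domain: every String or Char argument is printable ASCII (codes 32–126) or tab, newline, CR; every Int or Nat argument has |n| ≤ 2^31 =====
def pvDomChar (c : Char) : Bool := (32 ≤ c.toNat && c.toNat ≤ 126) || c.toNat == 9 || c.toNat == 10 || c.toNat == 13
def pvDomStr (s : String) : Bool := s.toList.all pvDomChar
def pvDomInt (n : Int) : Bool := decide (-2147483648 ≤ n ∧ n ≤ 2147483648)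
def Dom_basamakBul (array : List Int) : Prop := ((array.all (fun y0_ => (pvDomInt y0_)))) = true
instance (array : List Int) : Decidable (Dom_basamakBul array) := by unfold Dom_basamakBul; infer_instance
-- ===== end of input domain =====

-- B replaces A's char-by-char reset-at-dot counter and multiply loop with 10 ** max of str-lengths (objective: simpler).

-- ===== PORT A =====
def basamakBul (array : List Int) : Int :=
  let newsayac : Int :=
    array.foldl (fun newsayac j =>
      let sayac : Int :=
        (PySem.Int.toChars j).foldl
          (fun sayac k =>
            let sayac := sayac + 1
            if k = '.' then 0 else sayac) 0
      if sayac > newsayac then sayac else newsayac) 0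
  (PySem.List.pyRange 0 newsayac 1).foldl (fun donusdegeri _ => donusdegeri * 10) 1

-- ===== PORT B =====
def basamakBul_alt (array : List Int) : Int :=
  (10 : Int) ^ PySem.List.maxD (array.map fun j => (PySem.Int.toChars j).length) id 0

-- ===== PRECONDITION & SPEC =====
def Spec_basamakBul (array : List Int) (out : Int) : Prop := out = basamakBul_alt array
instance (array : List Int) (out : Int) : Decidable (Spec_basamakBul array out) := by unfold Spec_basamakBul; infer_instance

-- ===== CLAIM (what is proved, stated in full; the proofs are below) =====
def Claim_equal_basamakBul : Prop := ∀ (array : List Int), Dom_basamakBul array → Spec_basamakBul array (basamakBul array)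

-- ===== LEMMAS AND PROOFS =====

-- str(j) of an int never contains '.'
theorem no_dot_toChars (j : Int) (c : Char) (h : c ∈ PySem.Int.toChars j) : c ≠ '.' := by
  unfold PySem.Int.toChars at h
  have digit : ∀ {m : Nat}, c ∈ Nat.toDigits 10 m → c ≠ '.' := by
    intro m hm
    have := Nat.isDigit_of_mem_toDigits (by norm_num) (by norm_num) hm
    rintro rfl; simp [Char.isDigit] at this
  split at h
  · rcases List.mem_cons.mp h with rfl | h
    · decide
    · exact digit h
  · exact digit h

-- A's inner loop on a dot-free char list just counts the length
theorem inner_count (l : List Char) (hnd : ∀ c ∈ l, c ≠ '.') (s : Int) :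
    l.foldl (fun sayac k => let sayac := sayac + 1; if k = '.' then 0 else sayac) s
      = s + l.length := by
  induction l generalizing s with
  | nil => simp
  | cons c l ih =>
    have hc : c ≠ '.' := hnd c (List.mem_cons_self)
    simp only [List.foldl_cons, if_neg hc]
    rw [ih (fun c hc' => hnd c (List.mem_cons_of_mem _ hc'))]
    simp only [List.length_cons]; push_cast; ring

-- A's outer max-accumulator fold, started at a cast Nat, is the cast of the Nat max fold
theorem outer_max_cast (array : List Int) (m : Nat) :
    array.foldl (fun a j => if ((PySem.Int.toChars j).length : Int) > a
                            then ((PySem.Int.toChars j).length : Int) else a) (m : Int)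
      = ((array.foldl (fun a j => max a (PySem.Int.toChars j).length) m : Nat) : Int) := by
  induction array generalizing m with
  | nil => simp
  | cons j t ih =>
    simp only [List.foldl_cons]
    have : (if ((PySem.Int.toChars j).length : Int) > (m : Int)
            then ((PySem.Int.toChars j).length : Int) else (m : Int))
         = ((max m (PySem.Int.toChars j).length : Nat) : Int) := by
      rw [Nat.cast_max]
      rcases le_or_gt ((PySem.Int.toChars j).length : Int) (m : Int) with h | h
      · rw [if_neg (not_lt.mpr h), max_eq_left (by exact_mod_cast h)]
      · rw [if_pos h, max_eq_right (le_of_lt (by exact_mod_cast h))]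
    rw [this, ih]

-- maxD with identity key and default 0 is the foldl-max over Nat
theorem max?_cons_nat (t : List Nat) : ∀ x : Nat,
    PySem.List.max? (x :: t) id = some (t.foldl (fun a b => max a b) x) := by
  induction t with
  | nil => intro x; rfl
  | cons y t ih =>
    intro x
    have h1 : PySem.List.max? (x :: y :: t) id
        = PySem.List.max? ((if x < y then y else x) :: t) id := by
      simp only [PySem.List.max?, List.foldl_cons, id_eq]
      split <;> rfl
    rw [h1, List.foldl_cons]
    rcases lt_or_ge x y with h | h
    · rw [if_pos h, ih y, max_eq_right (le_of_lt h)]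
    · rw [if_neg (not_lt.mpr h), ih x, max_eq_left h]

theorem maxD_eq_foldl_max (L : List Nat) :
    PySem.List.maxD L id 0 = L.foldl (fun a x => max a x) 0 := by
  cases L with
  | nil => rfl
  | cons x t =>
    rw [PySem.List.maxD, max?_cons_nat, List.foldl_cons, Nat.zero_max]
    rfl

-- the multiply loop over range(n) computes 10^n
theorem pow_loop (n : Nat) :
    (PySem.List.pyRange 0 (n : Int) 1).foldl (fun d _ => d * 10) 1 = (10 : Int) ^ n := by
  induction n with
  | zero => rfl
  | succ k ih =>
    have : ((k : Int) + 1) = ((k + 1 : Nat) : Int) := by push_cast; ring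
    rw [show ((k + 1 : Nat) : Int) = (k : Int) + 1 by push_cast; ring,
        PySem.List.pyRange_one_succ_right (by positivity), List.foldl_append, ih]
    simp [pow_succ]

-- ===== VERDICT (by name: the statement is the Claim_ definition above) =====
theorem basamakBul_spec : Claim_equal_basamakBul := by
  intro array _
  unfold Spec_basamakBul basamakBul basamakBul_alt
  have inner : ∀ j : Int,
      (PySem.Int.toChars j).foldl
        (fun sayac k => let sayac := sayac + 1; if k = '.' then 0 else sayac) 0
      = ((PySem.Int.toChars j).length : Int) := by
    intro j
    rw [inner_count _ (no_dot_toChars j) 0]; ring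
  simp only [inner]
  rw [show (0 : Int) = ((0 : Nat) : Int) from rfl, outer_max_cast]
  simp only [Nat.cast_zero]
  rw [pow_loop, maxD_eq_foldl_max, List.foldl_map]
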